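-- pv_equiv track=rewrite | github.com/NiceStudentAccount/FirstSemester | Ejercicios 1-30/21(estudiar).py | amarillo
-- ===== SOURCE A (Python) =====
-- def lego(n):
--     if n == 0:
--         return 0
--     a = 0
--     b = 1
--     c = 1
--     for x in range(1, n):
--         a = b
--         b = c
--         c = a + b
--     return c
--
-- def amarillo(n):
--     contador = 0
--     n -= 3
--     if n == 0:
--         return 1
--     y = n
--     for x in range(0, n+1):
--         if x == 0:
--             contador +=  lego(y)
--         if y == 0:
--             contador += lego(x)
--         else:
--             contador += lego(x) * lego(y)
--         y -= 1
--     return contador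
-- ===== SOURCE B (Python) =====
-- def amarillo(n):
--     m = n - 3
--     if m == 0:
--         return 1
--     if m < 0:
--         return 0
--     fib = [0, 1]
--     for _ in range(m):
--         fib.append(fib[-1] + fib[-2])
--     L = [0] + fib[2:]
--     return 2 * L[m] + sum(L[x] * L[m - x] for x in range(1, m))
-- ===== Notes on version B (the rewrite author's own statement) =====
-- stated objective: faster
-- what changed: B builds one Fibonacci table and returns twice its top entry plus a single convolution sum over the table, instead of A's loop that recomputes the whole lego Fibonacci iteration from scratch for both factors at every index.
import Mathlib
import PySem

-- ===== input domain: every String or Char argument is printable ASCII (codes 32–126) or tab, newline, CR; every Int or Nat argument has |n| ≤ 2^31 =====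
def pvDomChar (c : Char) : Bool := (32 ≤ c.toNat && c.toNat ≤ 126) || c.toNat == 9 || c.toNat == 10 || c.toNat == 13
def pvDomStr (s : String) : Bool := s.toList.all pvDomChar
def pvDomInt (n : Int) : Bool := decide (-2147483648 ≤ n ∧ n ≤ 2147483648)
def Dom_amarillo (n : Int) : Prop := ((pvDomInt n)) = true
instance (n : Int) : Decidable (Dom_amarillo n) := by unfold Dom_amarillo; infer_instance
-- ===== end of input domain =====

-- B builds the Fibonacci table once and sums the convolution, replacing A's per-index recomputation of lego; objective: faster.

-- ===== PORT A =====
def lego (n : Int) : Int :=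
  if n = 0 then 0
  else
    let s := (PySem.List.pyRange 1 n 1).foldl
      (fun (st : Int × Int × Int) _ => (st.2.1, st.2.2, st.2.1 + st.2.2)) (0, 1, 1)
    s.2.2

def amarillo (n : Int) : Int :=
  let m := n - 3
  if m = 0 then 1
  else
    let s := (PySem.List.pyRange 0 (m + 1) 1).foldl
      (fun (st : Int × Int) x =>
        let contador := st.1
        let y := st.2
        let contador := if x = 0 then contador + lego y else contador
        let contador := if y = 0 then contador + lego x else contador + lego x * lego y
        (contador, y - 1)) (0, m)
    s.1

-- ===== PORT B =====
def amarillo_alt (n : Int) : Int :=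
  let m := n - 3
  if m = 0 then 1
  else if m < 0 then 0
  else
    let fib := (PySem.List.pyRange 0 m 1).foldl
      (fun (l : List Int) _ =>
        l ++ [PySem.List.pyGetD l (-1) 0 + PySem.List.pyGetD l (-2) 0]) [0, 1]
    let L := 0 :: PySem.List.slice fib (some 2) none
    2 * PySem.List.pyGetD L m 0 +
      (PySem.List.pyRange 1 m 1).foldl
        (fun acc x => acc + PySem.List.pyGetD L x 0 * PySem.List.pyGetD L (m - x) 0) 0

-- ===== PRECONDITION & SPEC =====
def Spec_amarillo (n : Int) (out : Int) : Prop := out = amarillo_alt n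
instance (n : Int) (out : Int) : Decidable (Spec_amarillo n out) := by unfold Spec_amarillo; infer_instance

-- ===== CLAIM (what is proved, stated in full; the proofs are below) =====
def Claim_equal_amarillo : Prop := ∀ (n : Int), Dom_amarillo n → Spec_amarillo n (amarillo n)

-- ===== LEMMAS AND PROOFS =====

-- mathematical Fibonacci, reference for both ports
def mfib : Nat → Int
  | 0 => 0
  | 1 => 1
  | (k+2) => mfib k + mfib (k+1)

-- value of Python's lego at a nonnegative argument
def legoV (k : Nat) : Int := if k = 0 then 0 else mfib (k+1)

theorem lego_fold (k : Nat) :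
    (PySem.List.pyRange 1 (1 + (k : Int)) 1).foldl
      (fun (st : Int × Int × Int) _ => (st.2.1, st.2.2, st.2.1 + st.2.2)) (0, 1, 1)
      = (mfib k, mfib (k+1), mfib (k+2)) := by
  induction k with
  | zero => simp [mfib]
  | succ j ih =>
      have h : (1 : Int) + ((j+1 : Nat) : Int) = (1 + (j : Int)) + 1 := by push_cast; ring
      rw [h, PySem.List.pyRange_one_succ_right (by omega), List.foldl_append, ih]
      simp [mfib]

theorem lego_eq (k : Nat) : lego (k : Int) = legoV k := by
  cases k with
  | zero => simp [lego, legoV]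
  | succ j =>
      have h : ((j+1 : Nat) : Int) = 1 + (j : Int) := by push_cast; ring
      unfold lego legoV
      rw [if_neg (by omega), h, lego_fold]
      simp

theorem A_fold (m : Int) (k : Nat) :
    (PySem.List.pyRange 0 (k : Int) 1).foldl
      (fun (st : Int × Int) x =>
        let contador := st.1
        let y := st.2
        let contador := if x = 0 then contador + lego y else contador
        let contador := if y = 0 then contador + lego x else contador + lego x * lego y
        (contador, y - 1)) (0, m)
      = (((List.range k).map (fun x : Nat =>
            (if (x : Int) = 0 then lego m else 0) +
            (if m - (x : Int) = 0 then lego (x : Int) else lego (x : Int) * lego (m - (x : Int))))).sum,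
         m - (k : Int)) := by
  induction k with
  | zero => simp [PySem.List.pyRange_one_eq_nil (by omega : (0:Int) ≤ 0)]
  | succ j ih =>
      have h : ((j+1 : Nat) : Int) = (j : Int) + 1 := by push_cast; ring
      rw [h, PySem.List.pyRange_one_succ_right (by omega), List.foldl_append, ih]
      simp only [List.foldl_cons, List.foldl_nil, List.range_succ, List.map_append, List.sum_append,
        List.map_cons, List.map_nil, List.sum_cons, List.sum_nil]
      have hy : m - (j : Int) - 1 = m - ((j : Int) + 1) := by ring
      have hy : m - (j : Int) - 1 = m - ((j : Int) + 1) := by ring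
      refine Prod.ext ?_ (by simp [hy])
      simp only
      split_ifs
      all_goals (try rw [show m - (j : Int) = m from by omega])
      all_goals ring

theorem pyGetD_last (l : List Int) (j : Nat) (hlen : l.length = j + 2) :
    PySem.List.pyGetD l (-1) 0 = l.getD (j + 1) 0 := by
  unfold PySem.List.pyGetD PySem.List.pyGet? PySem.List.pyIdx?
  simp [hlen]

theorem pyGetD_penult (l : List Int) (j : Nat) (hlen : l.length = j + 2) :
    PySem.List.pyGetD l (-2) 0 = l.getD j 0 := by
  unfold PySem.List.pyGetD PySem.List.pyGet? PySem.List.pyIdx?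
  simp [hlen]

theorem fib_fold (k : Nat) :
    (PySem.List.pyRange 0 (k : Int) 1).foldl
      (fun (l : List Int) _ =>
        l ++ [PySem.List.pyGetD l (-1) 0 + PySem.List.pyGetD l (-2) 0]) [0, 1]
      = (List.range (k + 2)).map mfib := by
  induction k with
  | zero =>
      have h0 : ((0 : Nat) : Int) = 0 := rfl
      rw [h0, PySem.List.pyRange_one_eq_nil le_rfl]
      decide
  | succ j ih =>
      have h : ((j+1 : Nat) : Int) = (j : Int) + 1 := by push_cast; ring
      rw [h, PySem.List.pyRange_one_succ_right (by omega), List.foldl_append, ih]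
      have hlen : ((List.range (j + 2)).map mfib).length = j + 2 := by simp
      have g1 : PySem.List.pyGetD ((List.range (j + 2)).map mfib) (-1) 0 = mfib (j + 1) := by
        rw [pyGetD_last _ j hlen, List.getD_eq_getElem _ _ (by simp)]
        simp
      have g2 : PySem.List.pyGetD ((List.range (j + 2)).map mfib) (-2) 0 = mfib j := by
        rw [pyGetD_penult _ j hlen, List.getD_eq_getElem _ _ (by simp)]
        simp
      simp only [List.foldl_cons, List.foldl_nil, g1, g2]
      have : mfib (j + 1) + mfib j = mfib (j + 2) := by rw [mfib]; ring
      rw [this]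
      simp [List.range_succ]

-- the table L = [0] + fib[2:] holds legoV at every index 0..k
theorem L_get (k x : Nat) (hx : x ≤ k) :
    PySem.List.pyGetD (0 :: ((List.range (k + 2)).map mfib).drop 2) (x : Int) 0 = legoV x := by
  have hlen : ((0 : Int) :: ((List.range (k + 2)).map mfib).drop 2).length = k + 1 := by simp
  rw [PySem.List.pyGetD_of_nonneg _ _ (by omega)]
  cases x with
  | zero => simp [legoV]
  | succ j =>
      simp only [Int.toNat_natCast, List.getD_cons_succ]
      rw [List.getD_eq_getElem _ _ (by simp; omega)]
      rw [List.getElem_drop, List.getElem_map, List.getElem_range]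
      simp [legoV]
      congr 1
      omega

-- ===== VERDICT (by name: the statement is the Claim_ definition above) =====
theorem amarillo_spec : Claim_equal_amarillo := by
  intro n _
  unfold Spec_amarillo amarillo amarillo_alt
  set m := n - 3 with hm
  by_cases h0 : m = 0
  · simp [h0]
  · rw [if_neg h0, if_neg h0]
    by_cases hneg : m < 0
    · rw [if_pos hneg]
      rw [PySem.List.pyRange_one_eq_nil (by omega : m + 1 ≤ 0)]
      rfl
    · rw [if_neg hneg]
      simp only []
      obtain ⟨k, hk⟩ : ∃ k : Nat, m = (k : Int) := ⟨m.toNat, by omega⟩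
      have hk1 : 1 ≤ k := by omega
      have hA : m + 1 = ((k + 1 : Nat) : Int) := by omega
      rw [hA, A_fold m (k + 1)]
      rw [hk, fib_fold k]
      simp only [PySem.List.slice_from _ (by omega : (0:Int) ≤ 2)]
      obtain ⟨p, hp⟩ : ∃ p : Nat, k = p + 1 := ⟨k - 1, by omega⟩
      subst hp
      have lego0 : lego (0 : Int) = 0 := by simp [lego]
      -- the common convolution sum
      have hmid : ∀ i ∈ List.range p,
          (fun x : Nat =>
            (if (x : Int) = 0 then lego ((p+1 : Nat) : Int) else 0) +
            (if ((p+1 : Nat) : Int) - (x : Int) = 0 then lego (x : Int)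
             else lego (x : Int) * lego (((p+1 : Nat) : Int) - (x : Int)))) (Nat.succ i)
          = legoV (i+1) * legoV (p-i) := by
        intro i hi
        have hip : i < p := List.mem_range.mp hi
        simp only
        rw [if_neg (by push_cast; omega), if_neg (by push_cast; omega)]
        have h1 : ((Nat.succ i : Nat) : Int) = ((i+1 : Nat) : Int) := by push_cast; ring
        have h2 : ((p+1 : Nat) : Int) - ((Nat.succ i : Nat) : Int) = ((p - i : Nat) : Int) := by
          push_cast [Nat.cast_sub (by omega : i ≤ p)]; ring
        rw [h1, h2, lego_eq, lego_eq]
        simp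
      have hAsum :
          (List.map (fun x : Nat =>
            (if (x : Int) = 0 then lego ((p+1 : Nat) : Int) else 0) +
            (if ((p+1 : Nat) : Int) - (x : Int) = 0 then lego (x : Int)
             else lego (x : Int) * lego (((p+1 : Nat) : Int) - (x : Int))))
            (List.range (p + 1 + 1))).sum
          = 2 * legoV (p+1) + (List.map (fun i => legoV (i+1) * legoV (p-i)) (List.range p)).sum := by
        rw [List.range_succ, List.map_append, List.sum_append]
        rw [List.range_succ_eq_map, List.map_cons, List.map_map, List.sum_cons]
        have e1 : List.map ((fun x : Nat =>
            (if (x : Int) = 0 then lego ((p+1 : Nat) : Int) else 0) +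
            (if ((p+1 : Nat) : Int) - (x : Int) = 0 then lego (x : Int)
             else lego (x : Int) * lego (((p+1 : Nat) : Int) - (x : Int)))) ∘ Nat.succ)
            (List.range p)
            = List.map (fun i => legoV (i+1) * legoV (p-i)) (List.range p) :=
          List.map_congr_left (fun i hi => hmid i hi)
        rw [e1]
        simp only [List.map_cons, List.map_nil, List.sum_cons, List.sum_nil]
        rw [if_pos (by omega), if_neg (by omega), if_neg (by omega), if_pos (by omega)]
        rw [show ((0 : Nat) : Int) = (0 : Int) from rfl, lego0, lego_eq]
        ring
      rw [hAsum]
      simp only [show Int.toNat 2 = 2 from rfl]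
      -- B side
      have hL : ∀ x : Nat, x ≤ p + 1 →
          PySem.List.pyGetD (0 :: (List.map mfib (List.range (p + 1 + 2))).drop 2) ((x : Nat) : Int) 0
            = legoV x := fun x hx => L_get (p+1) x hx
      have hrange : ((PySem.List.pyRange 1 ((p+1 : Nat) : Int))) =
          List.map (fun i : Nat => ((i + 1 : Nat) : Int)) (List.range p) := by
        rw [PySem.List.pyRange_one]
        have : (((p+1 : Nat) : Int) - 1).toNat = p := by omega
        rw [this]
        apply List.map_congr_left
        intro i _
        push_cast; ring
      have hBsum : List.foldl (fun acc x =>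
            acc + PySem.List.pyGetD (0 :: (List.map mfib (List.range (p + 1 + 2))).drop 2) x 0 *
              PySem.List.pyGetD (0 :: (List.map mfib (List.range (p + 1 + 2))).drop 2) (((p+1 : Nat) : Int) - x) 0) 0
            (PySem.List.pyRange 1 ((p+1 : Nat) : Int))
          = (List.map (fun i => legoV (i+1) * legoV (p-i)) (List.range p)).sum := by
        rw [PySem.List.foldl_add, hrange, List.map_map]
        rw [List.map_congr_left (g := fun i => legoV (i+1) * legoV (p-i)) ?_]
        · ring
        · intro i hi
          have hip : i < p := List.mem_range.mp hi
          simp only [Function.comp_apply]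
          have h2 : ((p+1 : Nat) : Int) - ((i+1 : Nat) : Int) = ((p - i : Nat) : Int) := by
            push_cast [Nat.cast_sub (by omega : i ≤ p)]; ring
          rw [hL (i+1) (by omega), h2, hL (p-i) (by omega)]
      rw [hBsum]
      rw [hL (p+1) le_rfl]
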